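-- pv_equiv track=rewrite | github.com/fraluc06/Esercizi-python | Ex Esami/Eserciziario/21 fatto/program.py | es21
-- ===== SOURCE A (Python) =====
-- def es21(matrice):
--     '''
--     es21(matrice) presa la matrice di caratteri rappresentata tramite una lista di liste di caratteri,
--     la restituisce dopo averne ordinato le colonne in ordine lessicografico.
--     La matrice passata in input al termine della funzione non deve risultare modificata.
--     Ad esempio se la matrice di input e'
--      [['q','s','g','g'],
--       ['b','a','m','f'],
--       ['a','b','n','z']]
--     la funzione restituira' la matrice:
--      [['a','a','g','f'],
--       ['b','b','m','g'],
--       ['q','s','n','z']]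
--     '''
--
--     nr = len(matrice)
--     nc = len(matrice[0])
--     new_mat = []
--     for r in range (nr):
--         app_list = []
--         for c in range (nc):
--            app_list.append(' ')
--         new_mat.append(app_list)
--
--     for c in range(nc):
--         app_list = []
--         for r in range(nr):
--             app_list += matrice [r][c]
--         app_list.sort()
--         for n in range(nr):
--             new_mat[n][c] = app_list[n]
--     return new_mat
-- ===== SOURCE B (Python) =====
-- def es21(matrice):
--     # Counting sort per column over ASCII codes instead of comparison sort.
--     nr = len(matrice)
--     nc = len(matrice[0])
--     cols = []
--     for c in range(nc):
--         counts = [0] * 128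
--         for row in matrice:
--             for ch in row[c]:
--                 counts[ord(ch)] += 1
--         cols.append([chr(code) for code in range(128) for _ in range(counts[code])])
--     return [[cols[c][r] for c in range(nc)] for r in range(nr)]
-- ===== Notes on version B (the rewrite author's own statement) =====
-- stated objective: alternative
-- what changed: Replaces the per-column comparison sort (gather, list.sort, scatter into a pre-built blank matrix) with a counting sort: a 128-entry frequency table of ASCII codes per column, columns emitted in code order, rows rebuilt by comprehension.
import Mathlib
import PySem

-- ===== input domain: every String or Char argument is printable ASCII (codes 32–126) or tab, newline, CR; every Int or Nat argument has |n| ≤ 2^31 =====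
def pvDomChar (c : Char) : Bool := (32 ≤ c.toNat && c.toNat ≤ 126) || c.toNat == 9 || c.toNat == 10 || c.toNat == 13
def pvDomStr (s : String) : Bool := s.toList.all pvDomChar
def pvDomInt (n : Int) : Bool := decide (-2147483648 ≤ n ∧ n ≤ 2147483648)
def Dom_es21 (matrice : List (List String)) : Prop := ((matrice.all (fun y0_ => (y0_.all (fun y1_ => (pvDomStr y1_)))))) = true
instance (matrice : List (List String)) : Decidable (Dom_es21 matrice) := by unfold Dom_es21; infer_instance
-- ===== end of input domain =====

-- B replaces A's per-column comparison sort (gather, sort, scatter into a blank matrix)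
-- with a per-column COUNTING SORT over the 128 ASCII codes; same return value on Pre_.

-- ===== PORT A =====
-- Literal port of A: build an nr×nc blank matrix, then for each column gather the
-- column's characters (`app_list += matrice[r][c]` extends by the CHARACTERS of the
-- cell string), sort them, and scatter the first nr back into the column.
-- Indices produced by `range` are in range on Pre_ inputs, so `getD` is Python indexing there.
def es21 (matrice : List (List String)) : List (List String) :=
  let nr := matrice.length
  let nc := (matrice.headD []).length
  let new_mat := (List.range nr).map (fun _ => (List.range nc).map (fun _ => " "))
  (List.range nc).foldl (fun m c =>
    let app_list := (List.range nr).foldl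
      (fun acc r => acc ++ ((matrice.getD r []).getD c "").toList) ([] : List Char)
    let app_sorted := PySem.List.sorted app_list (fun x => x) false
    (List.range nr).foldl
      (fun m2 n => m2.set n ((m2.getD n []).set c (String.ofList [app_sorted.getD n ' ']))) m)
    new_mat

-- ===== PORT B =====
-- Port of B (counting sort per column): a 128-slot frequency table is filled by one
-- pass over the rows' cells of column c, the sorted column is emitted by walking the
-- codes in increasing order (`[chr(code) for code in range(128) for _ in range(counts[code])]`
-- = flatMap of replicates), and the rows are rebuilt by comprehension.
def es21_alt (matrice : List (List String)) : List (List String) :=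
  let nr := matrice.length
  let nc := (matrice.headD []).length
  let cols := (List.range nc).foldl (fun cols c =>
    let counts := matrice.foldl (fun counts row =>
        ((row.getD c "").toList).foldl
          (fun counts ch => counts.set ch.toNat (counts.getD ch.toNat 0 + 1)) counts)
      (List.replicate 128 (0 : Nat))
    cols ++ [(List.range 128).flatMap
      (fun code => List.replicate (counts.getD code 0) (Char.ofNat code))]) ([] : List (List Char))
  (List.range nr).map (fun r =>
    (List.range nc).map (fun c => String.ofList [(cols.getD c []).getD r ' ']))

-- ===== PRECONDITION & SPEC =====
-- Pre_ excludes exactly the inputs where A raises IndexError: the empty matrix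
-- (matrice[0]), a row shorter than the first row (matrice[r][c]), and a column whose
-- total character count is below the number of rows (app_list[n]).
def Pre_es21 (matrice : List (List String)) : Prop :=
  matrice ≠ [] ∧
  (∀ row ∈ matrice, (matrice.headD []).length ≤ row.length) ∧
  (∀ c ∈ List.range (matrice.headD []).length,
    matrice.length ≤ (matrice.map (fun row => (row.getD c "").toList.length)).sum)
instance (matrice : List (List String)) : Decidable (Pre_es21 matrice) := by
  unfold Pre_es21; infer_instance

def pvWitness_es21 : List (List String) := [["q", "s"], ["b", "a"], ["a", "b"]]

def Spec_es21 (matrice : List (List String)) (out : List (List String)) : Prop := out = es21_alt matrice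
instance (matrice : List (List String)) (out : List (List String)) : Decidable (Spec_es21 matrice out) := by unfold Spec_es21; infer_instance

-- ===== CLAIM (what is proved, stated in full; the proofs are below) =====
def Claim_equal_es21 : Prop := ∀ (matrice : List (List String)), Dom_es21 matrice → Pre_es21 matrice → Spec_es21 matrice (es21 matrice)

-- ===== LEMMAS AND PROOFS =====

-- shifting a set/getD-fold past a cons
theorem foldl_set_shift {α : Type} (l : List Nat) (a : α) (t : List α) (f : Nat → α → α) (d : α) :
    l.foldl (fun acc n => acc.set (n+1) (f (n+1) (acc.getD (n+1) d))) (a :: t)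
      = a :: l.foldl (fun acc n => acc.set n (f (n+1) (acc.getD n d))) t := by
  induction l generalizing t with
  | nil => rfl
  | cons x xs ih =>
    simp only [List.foldl_cons, List.set_cons_succ, List.getD_cons_succ]
    exact ih _

-- a fold that sets every index of `m` once equals mapIdx on the original list
theorem foldl_range_set {α : Type} (m : List α) (f : Nat → α → α) (d : α) :
    (List.range m.length).foldl (fun acc n => acc.set n (f n (acc.getD n d))) m
      = m.mapIdx f := by
  induction m generalizing f with
  | nil => rfl
  | cons a t ih =>
    rw [List.length_cons, List.range_succ_eq_map, List.foldl_cons, List.foldl_map]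
    simp only [List.set_cons_zero, List.getD_cons_zero]
    rw [foldl_set_shift, ih (fun n x => f (n+1) x)]
    simp [List.mapIdx_cons]

theorem mapIdx_mapIdx {α : Type} (m : List α) (f g : Nat → α → α) :
    (m.mapIdx f).mapIdx g = m.mapIdx (fun n x => g n (f n x)) := by
  apply List.ext_getElem <;> simp

theorem mapIdx_const_arg {α β : Type} (m : List α) (g : Nat → β) :
    m.mapIdx (fun n _ => g n) = (List.range m.length).map g := by
  apply List.ext_getElem <;> simp

-- folding a binary op over the elements of m, fetched by index
theorem foldl_range_getD {α β : Type} (m : List α) (g : β → α → β) (init : β) (d : α) :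
    (List.range m.length).foldl (fun acc r => g acc (m.getD r d)) init = m.foldl g init := by
  have h : (List.range m.length).map (fun r => m.getD r d) = m := by
    apply List.ext_getElem
    · simp
    · intro i h1 h2; simp [List.getD_eq_getElem?_getD, List.getElem?_eq_getElem h2]
  rw [← List.foldl_map, h]

-- the sorted character multiset of column c (shared normal form of both ports)
def sortedCol (matrice : List (List String)) (c : Nat) : List Char :=
  PySem.List.sorted ((matrice.map (fun row => ((row.getD c "").toList))).flatten)
    (fun x => x) false

theorem es21_eq_normal (matrice : List (List String)) :
    es21 matrice
      = (List.range matrice.length).map (fun n =>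
          (List.range (matrice.headD []).length).map (fun c =>
            String.ofList [(sortedCol matrice c).getD n ' '])) := by
  unfold es21
  simp only []
  set nr := matrice.length with hnr
  set nc := (matrice.headD []).length with hnc
  have hcol : ∀ c : Nat,
      PySem.List.sorted
        ((List.range nr).foldl (fun acc r => acc ++ ((matrice.getD r []).getD c "").toList) [])
        (fun x => x) false = sortedCol matrice c := by
    intro c
    rw [hnr, foldl_range_getD matrice (fun acc row => acc ++ (row.getD c "").toList) [] []]
    unfold sortedCol
    congr 1
    rw [PySem.List.foldl_append_eq_flatMap (fun row => (row.getD c "").toList) matrice []]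
    simp [List.flatMap_def]
  have hgen : ∀ (cs : List Nat) (m0 : List (List String)), m0.length = nr →
      cs.foldl (fun m c =>
          (List.range nr).foldl (fun m2 n => m2.set n ((m2.getD n []).set c
            (String.ofList [(PySem.List.sorted
              ((List.range nr).foldl (fun acc r => acc ++ ((matrice.getD r []).getD c "").toList) [])
              (fun x => x) false).getD n ' ']))) m) m0
        = m0.mapIdx (fun n row =>
            cs.foldl (fun row c => row.set c (String.ofList [(sortedCol matrice c).getD n ' '])) row) := by
    intro cs
    induction cs with
    | nil =>
      intro m0 h
      simp only [List.foldl_nil]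
      apply List.ext_getElem <;> simp
    | cons c cs ih =>
      intro m0 h
      simp only [List.foldl_cons]
      rw [← h]
      rw [foldl_range_set m0
        (fun n row => row.set c (String.ofList [(PySem.List.sorted
          ((List.range m0.length).foldl (fun acc r => acc ++ ((matrice.getD r []).getD c "").toList) [])
          (fun x => x) false).getD n ' '])) []]
      rw [h]
      rw [ih _ (by simp [h]), mapIdx_mapIdx]
      simp only [hcol]
  rw [hgen (List.range nc) _ (by simp)]
  have hblank : ∀ (F : Nat → List String → List String),
      ((List.range nr).map (fun _ => (List.range nc).map (fun _ => " "))).mapIdx F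
        = (List.range nr).map (fun n => F n ((List.range nc).map (fun _ => " "))) := by
    intro F; apply List.ext_getElem <;> simp
  rw [hblank]
  apply List.map_congr_left
  intro n _
  have hrow := foldl_range_set ((List.range nc).map (fun _ => " "))
    (fun c (_ : String) => String.ofList [(sortedCol matrice c).getD n ' ']) ""
  simp only [List.length_map, List.length_range] at hrow
  have : ((List.range nc).map (fun _ => " ")).mapIdx
      (fun c _ => String.ofList [(sortedCol matrice c).getD n ' '])
      = (List.range nc).map (fun c => String.ofList [(sortedCol matrice c).getD n ' ']) := by
    rw [mapIdx_const_arg]; simp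
  rw [← this, ← hrow]

-- ---- B-side lemmas: counting sort = comparison sort on sub-128 characters ----

theorem foldl_append_singleton {α β : Type} (l : List α) (f : α → β) (a0 : List β) :
    l.foldl (fun acc c => acc ++ [f c]) a0 = a0 ++ l.map f := by
  induction l generalizing a0 with
  | nil => simp
  | cons x xs ih => simp [ih]



theorem char_ofNat_toNat_lt (n : Nat) (h : n < 128) : (Char.ofNat n).toNat = n := by
  rw [Char.toNat_ofNat, if_pos]
  unfold Nat.isValidChar; omega

theorem char_ofNat_inj_lt (ch : Char) (n : Nat) (h : n < 128) :
    (Char.ofNat n = ch) ↔ n = ch.toNat := by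
  constructor
  · intro he; rw [← he, char_ofNat_toNat_lt n h]
  · intro he; rw [he, Char.ofNat_toNat]

theorem chr_le_chr (i j : Nat) (hj : j < 128) (hij : i ≤ j) : Char.ofNat i ≤ Char.ofNat j := by
  rw [Char.le_def, UInt32.le_iff_toNat_le]
  have hi := char_ofNat_toNat_lt i (lt_of_le_of_lt hij hj)
  have hjj := char_ofNat_toNat_lt j hj
  simp only [Char.toNat] at hi hjj
  omega

-- the frequency-table fold counts occurrences
theorem counts_getD (l : List Char) : ∀ (cs : List Nat), cs.length = 128 →
    (∀ ch ∈ l, ch.toNat < 128) → ∀ i, i < 128 →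
    (l.foldl (fun counts ch => counts.set ch.toNat (counts.getD ch.toNat 0 + 1)) cs).getD i 0
      = cs.getD i 0 + l.count (Char.ofNat i) := by
  induction l with
  | nil => intro cs _ _ i _; simp
  | cons ch t ih =>
    intro cs hlen hl i hi
    have hch : ch.toNat < 128 := hl ch (by simp)
    rw [List.foldl_cons, ih _ (by simp [hlen]) (fun x hx => hl x (by simp [hx])) i hi,
        List.count_cons]
    have hset : (cs.set ch.toNat (cs.getD ch.toNat 0 + 1)).getD i 0
        = cs.getD i 0 + (if (ch == Char.ofNat i) = true then 1 else 0) := by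
      by_cases hcase : i = ch.toNat
      · subst hcase
        rw [List.getD_eq_getElem?_getD, List.getElem?_set_self (by omega)]
        simp [Char.ofNat_toNat]
      · have hne : ch.toNat ≠ i := fun he => hcase he.symm
        rw [List.getD_eq_getElem?_getD, List.getElem?_set_ne hne, ← List.getD_eq_getElem?_getD]
        have hb : (ch == Char.ofNat i) = false := by
          rw [beq_eq_false_iff_ne]
          intro he; exact hcase ((char_ofNat_inj_lt ch i hi).mp he.symm)
        simp [hb]
    rw [hset]
    cases (ch == Char.ofNat i) <;> (simp; try omega)

theorem count_flatMap_repl (codes : List Nat) (cnt : Nat → Nat) (a : Char) :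
    ((codes.flatMap (fun code => List.replicate (cnt code) (Char.ofNat code))).count a)
      = (codes.map (fun code => if Char.ofNat code = a then cnt code else 0)).sum := by
  induction codes with
  | nil => simp
  | cons x xs ih =>
    rw [List.flatMap_cons, List.count_append, ih, List.map_cons, List.sum_cons,
        List.count_replicate]
    congr 1
    simp [beq_iff_eq]

theorem sum_map_range_single (n j : Nat) (f : Nat → Nat) (hj : j < n)
    (h0 : ∀ i, i < n → i ≠ j → f i = 0) : ((List.range n).map f).sum = f j := by
  induction n with
  | zero => omega
  | succ n ih =>
    rw [List.range_succ, List.map_append, List.sum_append]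
    simp only [List.map_cons, List.map_nil, List.sum_cons, List.sum_nil]
    by_cases hcase : j = n
    · subst hcase
      have hz : ((List.range j).map f).sum = 0 := by
        apply List.sum_eq_zero; intro x hx
        simp only [List.mem_map, List.mem_range] at hx
        obtain ⟨i, hi, rfl⟩ := hx
        exact h0 i (by omega) (by omega)
      omega
    · rw [ih (by omega) (fun i hi hne => h0 i (by omega) hne), h0 n (by omega) (Ne.symm hcase)]
      omega

-- emitting the codes in increasing order is sorted-by-identity
theorem csort_eq_sorted (l : List Char) (hl : ∀ ch ∈ l, ch.toNat < 128) :
    (List.range 128).flatMap (fun code => List.replicate (l.count (Char.ofNat code)) (Char.ofNat code))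
      = PySem.List.sorted l (fun x => x) false := by
  have hperm : ((List.range 128).flatMap
      (fun code => List.replicate (l.count (Char.ofNat code)) (Char.ofNat code))).Perm l := by
    rw [List.perm_iff_count]; intro a
    rw [count_flatMap_repl]
    by_cases ha : a.toNat < 128
    · rw [sum_map_range_single 128 a.toNat _ ha
        (fun i hi hne => if_neg (fun he => hne ((char_ofNat_inj_lt a i hi).mp he)))]
      rw [Char.ofNat_toNat, if_pos rfl]
    · rw [List.sum_eq_zero ?_]
      · symm; rw [List.count_eq_zero]
        exact fun hmem => ha (hl a hmem)
      · intro x hx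
        simp only [List.mem_map, List.mem_range] at hx
        obtain ⟨i, hi, rfl⟩ := hx
        exact if_neg (fun he => ha (((char_ofNat_inj_lt a i hi).mp he) ▸ hi))
  have hpair : List.Pairwise (fun x1 x2 => x1 ≤ x2) ((List.range 128).flatMap
      (fun code => List.replicate (l.count (Char.ofNat code)) (Char.ofNat code))) := by
    rw [List.flatMap_def, List.pairwise_flatten]
    constructor
    · intro l' hl'
      rw [List.mem_map] at hl'; obtain ⟨code, -, rfl⟩ := hl'
      exact List.pairwise_replicate.mpr (Or.inr (le_refl _))
    · rw [List.pairwise_map]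
      refine List.Pairwise.imp_of_mem ?_ List.pairwise_lt_range
      intro i j hi hj hij x hx y hy
      rw [List.eq_of_mem_replicate hx, List.eq_of_mem_replicate hy]
      exact chr_le_chr i j (List.mem_range.mp hj) (le_of_lt hij)
  exact (PySem.List.sorted_id_eq_of_perm_of_pairwise l _ hperm hpair).symm

theorem getD_map_range {α : Type} (f : Nat → α) (n c : Nat) (hc : c < n) (d : α) :
    ((List.range n).map f).getD c d = f c := by
  rw [List.getD_eq_getElem?_getD, List.getElem?_map, List.getElem?_range hc]; rfl

theorem es21_alt_eq_normal (matrice : List (List String)) (hdom : Dom_es21 matrice) :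
    es21_alt matrice
      = (List.range matrice.length).map (fun n =>
          (List.range (matrice.headD []).length).map (fun c =>
            String.ofList [(sortedCol matrice c).getD n ' '])) := by
  unfold es21_alt
  simp only []
  set nr := matrice.length with hnr
  set nc := (matrice.headD []).length with hnc
  rw [foldl_append_singleton (List.range nc)
    (fun c => (List.range 128).flatMap (fun code => List.replicate
      ((matrice.foldl (fun counts row => ((row.getD c "").toList).foldl
          (fun counts ch => counts.set ch.toNat (counts.getD ch.toNat 0 + 1)) counts)
        (List.replicate 128 (0 : Nat))).getD code 0) (Char.ofNat code))) [],
    List.nil_append]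
  apply List.map_congr_left
  intro r _
  apply List.map_congr_left
  intro c hc
  have hc' : c < nc := List.mem_range.mp hc
  rw [getD_map_range _ _ _ hc' []]
  -- the column's characters, and the fact they are all sub-128 (from Dom)
  have hchars : ∀ ch ∈ (matrice.map (fun row => ((row.getD c "").toList))).flatten,
      ch.toNat < 128 := by
    intro ch hch
    rw [List.mem_flatten] at hch
    obtain ⟨cl, hcl, hch⟩ := hch
    rw [List.mem_map] at hcl
    obtain ⟨row, hrow, rfl⟩ := hcl
    rcases Nat.lt_or_ge c row.length with hlt | hge
    · have hcell : row.getD c "" = row[c] := by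
        rw [List.getD_eq_getElem?_getD, List.getElem?_eq_getElem hlt]; rfl
      rw [hcell] at hch
      unfold Dom_es21 at hdom
      simp only [List.all_eq_true] at hdom
      have hs := hdom row hrow (row[c]) (List.getElem_mem hlt)
      unfold pvDomStr at hs
      rw [List.all_eq_true] at hs
      have hchd := hs ch hch
      unfold pvDomChar at hchd
      simp only [Bool.or_eq_true, Bool.and_eq_true, decide_eq_true_eq, beq_iff_eq] at hchd
      omega
    · rw [List.getD_eq_default _ _ hge] at hch
      have : ("" : String).toList = [] := rfl
      rw [this] at hch
      exact absurd hch (List.not_mem_nil)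
  -- the nested counting fold is the flat fold over the column's characters
  have hfold : matrice.foldl (fun counts row => ((row.getD c "").toList).foldl
        (fun counts ch => counts.set ch.toNat (counts.getD ch.toNat 0 + 1)) counts)
        (List.replicate 128 (0 : Nat))
      = ((matrice.map (fun row => ((row.getD c "").toList))).flatten).foldl
        (fun counts ch => counts.set ch.toNat (counts.getD ch.toNat 0 + 1))
        (List.replicate 128 (0 : Nat)) := by
    rw [List.foldl_flatten, List.foldl_map]
  rw [hfold]
  -- the counts are the occurrence counts
  have hrepl : ∀ code ∈ List.range 128,
      List.replicate
        ((((matrice.map (fun row => ((row.getD c "").toList))).flatten).foldl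
          (fun counts ch => counts.set ch.toNat (counts.getD ch.toNat 0 + 1))
          (List.replicate 128 (0 : Nat))).getD code 0) (Char.ofNat code)
      = List.replicate
        (((matrice.map (fun row => ((row.getD c "").toList))).flatten).count (Char.ofNat code))
        (Char.ofNat code) := by
    intro code hcode
    rw [counts_getD _ _ (by simp) hchars code (List.mem_range.mp hcode)]
    congr 1
    have h0 : ∀ m k : Nat, (List.replicate m (0 : Nat)).getD k 0 = 0 := by
      intro m
      induction m with
      | zero => intro k; rfl
      | succ m ih => intro k; cases k <;> simp [List.replicate_succ]
    rw [h0]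
    omega
  rw [List.flatMap_def, List.map_congr_left hrepl, ← List.flatMap_def,
      csort_eq_sorted _ hchars]
  unfold sortedCol
  rfl

-- ===== VERDICT (by name: the statement is the Claim_ definition above) =====
theorem es21_spec : Claim_equal_es21 := by
  intro matrice hdom hpre
  unfold Spec_es21
  rw [es21_eq_normal, es21_alt_eq_normal matrice hdom]
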